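-- pv_equiv track=rewrite | github.com/sarpdogan/Python-PRojects | Project Multiple Console Shapes in a Row/main.py | grouped_shape_counter
-- ===== SOURCE A (Python) =====
-- def grouped_shape_counter(Drawing_List):
--     shapes = {"T": 0, "S": 0, "V": 0, "R": 0, "E": 0}
--     count_list = []
--
--     for draw in Drawing_List:
--         if draw == "N" or draw == "B":
--             count_list.append(shapes.copy())
--             shapes = {"T": 0, "S": 0, "V": 0, "R": 0, "E": 0}
--         elif draw == "DL":
--             continue
--         elif len(draw) >1 and draw[0] in shapes.keys():
--             shapes[draw[0]] += 1
--     count_list.append(shapes)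
--     return count_list
-- ===== SOURCE B (Python) =====
-- def grouped_shape_counter(Drawing_List):
--     # Two-phase: split into segments at "N"/"B", then count each segment.
--     segments = [[]]
--     for tok in Drawing_List:
--         if tok in ("N", "B"):
--             segments.append([])
--         else:
--             segments[-1].append(tok)
--
--     def count(segment):
--         d = {"T": 0, "S": 0, "V": 0, "R": 0, "E": 0}
--         for tok in segment:
--             if len(tok) > 1 and tok[0] in d:
--                 d[tok[0]] += 1
--         return d
--
--     return [count(seg) for seg in segments]
-- ===== Notes on version B (the rewrite author's own statement) =====
-- stated objective: alternative
-- what changed: Replaced A's single fold that threads a counter dict and an output list through every branch by a two-phase decomposition: first partition the tokens into segments at the 'N'/'B' separators, then independently map each segment to its count dict (the explicit 'DL' skip disappears: 'D' is never a counted key).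
import Mathlib
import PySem

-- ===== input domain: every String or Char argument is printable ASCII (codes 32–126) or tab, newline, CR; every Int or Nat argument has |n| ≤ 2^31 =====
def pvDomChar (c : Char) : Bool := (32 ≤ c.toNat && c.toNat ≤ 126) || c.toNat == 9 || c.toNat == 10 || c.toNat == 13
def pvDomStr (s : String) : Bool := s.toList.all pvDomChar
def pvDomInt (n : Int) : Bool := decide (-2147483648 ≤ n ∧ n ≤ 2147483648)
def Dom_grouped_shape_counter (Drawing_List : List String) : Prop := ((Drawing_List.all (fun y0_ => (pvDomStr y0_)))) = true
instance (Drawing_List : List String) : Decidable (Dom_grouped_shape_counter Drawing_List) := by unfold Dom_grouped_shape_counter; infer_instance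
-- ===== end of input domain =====

-- B replaces A's single state-threading fold by a split-into-segments pass followed by
-- an independent per-segment counting pass (alternative decomposition, same cost).

-- The Python dict with the fixed key set {"T","S","V","R","E"} is ported by hand as an
-- insertion-ordered assoc list: keys are only ever incremented in place, never added or
-- removed, so this is exact (shapes[k] += 1 = pvBump, k in shapes.keys() = map-fst contains).
def pvShapes0 : List (String × Int) := [("T", 0), ("S", 0), ("V", 0), ("R", 0), ("E", 0)]

def pvBump (d : List (String × Int)) (k : String) : List (String × Int) :=
  d.map (fun p => if p.1 == k then (p.1, p.2 + 1) else p)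

-- ===== PORT A =====
-- one step of A's loop body, branches in A's order
def pvStepA (st : List (String × Int) × List (List (String × Int))) (draw : String) :
    List (String × Int) × List (List (String × Int)) :=
  if draw == "N" || draw == "B" then (pvShapes0, st.2 ++ [st.1])
  else if draw == "DL" then st
  else if PySem.Str.len draw > 1 then
    match PySem.Str.pyGet? draw 0 with
    | some c =>
        if (st.1.map Prod.fst).contains (String.singleton c) then
          (pvBump st.1 (String.singleton c), st.2)
        else st
    | none => st
  else st

def grouped_shape_counter (Drawing_List : List String) : List (List (String × Int)) :=
  let st := Drawing_List.foldl pvStepA (pvShapes0, [])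
  st.2 ++ [st.1]

-- ===== PORT B =====
-- phase 1: cut the token list into segments at "N"/"B" (append to the last segment)
def pvSegments (Drawing_List : List String) : List (List String) :=
  Drawing_List.foldl
    (fun segs tok =>
      if tok == "N" || tok == "B" then segs ++ [[]]
      else segs.dropLast ++ [segs.getLastD [] ++ [tok]])
    [[]]

-- phase 2: count one segment (the body of B's `count`, one token)
def pvCountTok (d : List (String × Int)) (tok : String) : List (String × Int) :=
  if PySem.Str.len tok > 1 then
    match PySem.Str.pyGet? tok 0 with
    | some c =>
        if (d.map Prod.fst).contains (String.singleton c) then pvBump d (String.singleton c)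
        else d
    | none => d
  else d

def pvCount (segment : List String) : List (String × Int) :=
  segment.foldl pvCountTok pvShapes0

def grouped_shape_counter_alt (Drawing_List : List String) : List (List (String × Int)) :=
  (pvSegments Drawing_List).map pvCount

-- ===== PRECONDITION & SPEC =====
def Spec_grouped_shape_counter (Drawing_List : List String) (out : List (List (String × Int))) : Prop := out = grouped_shape_counter_alt Drawing_List
instance (Drawing_List : List String) (out : List (List (String × Int))) : Decidable (Spec_grouped_shape_counter Drawing_List out) := by unfold Spec_grouped_shape_counter; infer_instance

-- ===== CLAIM (what is proved, stated in full; the proofs are below) =====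
def Claim_equal_grouped_shape_counter : Prop := ∀ (Drawing_List : List String), Dom_grouped_shape_counter Drawing_List → Spec_grouped_shape_counter Drawing_List (grouped_shape_counter Drawing_List)

-- ===== LEMMAS AND PROOFS =====

-- reference function: the counts of L's segments, the first segment counted from state d
def pvH (d : List (String × Int)) : List String → List (List (String × Int))
  | [] => [d]
  | t :: L => if t == "N" || t == "B" then d :: pvH pvShapes0 L else pvH (pvCountTok d t) L

theorem pvBump_keys (d : List (String × Int)) (k : String) :
    (pvBump d k).map Prod.fst = d.map Prod.fst := by
  induction d with
  | nil => rfl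
  | cons p d ih =>
      simp only [pvBump, List.map_cons] at *
      rw [ih]
      split_ifs <;> rfl

theorem pvCountTok_keys (d : List (String × Int)) (t : String) :
    (pvCountTok d t).map Prod.fst = d.map Prod.fst := by
  unfold pvCountTok
  split
  · split
    · split
      · exact pvBump_keys _ _
      · rfl
    · rfl
  · rfl

theorem pvCountTok_DL (d : List (String × Int))
    (h : d.map Prod.fst = ["T", "S", "V", "R", "E"]) : pvCountTok d "DL" = d := by
  have h1 : PySem.Str.pyGet? "DL" 0 = some 'D' := rfl
  have h2 : (PySem.Str.len "DL" > 1) = True := by decide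
  have h3 : ((["T", "S", "V", "R", "E"] : List String).contains (String.singleton 'D')) = false := by
    decide
  simp only [pvCountTok, h1, h2, if_true, h, h3, Bool.false_eq_true, if_false]

theorem pvA_fold (L : List String) :
    ∀ (d : List (String × Int)) (cl : List (List (String × Int))),
      d.map Prod.fst = ["T", "S", "V", "R", "E"] →
      (L.foldl pvStepA (d, cl)).2 ++ [(L.foldl pvStepA (d, cl)).1] = cl ++ pvH d L := by
  induction L with
  | nil => intro d cl _; simp [pvH]
  | cons t L ih =>
      intro d cl hk
      by_cases hs : (t == "N" || t == "B") = true
      · have : pvStepA (d, cl) t = (pvShapes0, cl ++ [d]) := by simp [pvStepA, hs]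
        simp only [List.foldl_cons, this, pvH, hs, if_pos]
        rw [ih pvShapes0 (cl ++ [d]) (by decide)]
        simp
      · have hstep : pvStepA (d, cl) t = (pvCountTok d t, cl) := by
          by_cases hdl : (t == "DL") = true
          · have ht : t = "DL" := by simpa using hdl
            subst ht
            rw [pvCountTok_DL d hk]
            simp [pvStepA]
          · unfold pvStepA pvCountTok
            simp only [hs, hdl, Bool.false_eq_true, if_false]
            split
            · split
              · split <;> rfl
              · rfl
            · rfl
        simp only [List.foldl_cons, hstep, pvH, hs, if_neg, Bool.false_eq_true,
          not_false_iff]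
        exact ih _ cl (by rw [pvCountTok_keys, hk])

theorem pvB_fold (L : List String) :
    ∀ (done : List (List String)) (cur : List String),
      ((L.foldl
          (fun segs tok =>
            if tok == "N" || tok == "B" then segs ++ [[]]
            else segs.dropLast ++ [segs.getLastD [] ++ [tok]])
          (done ++ [cur])).map pvCount)
        = done.map pvCount ++ pvH (pvCount cur) L := by
  induction L with
  | nil => intro done cur; simp [pvH]
  | cons t L ih =>
      intro done cur
      by_cases hs : (t == "N" || t == "B") = true
      · simp only [List.foldl_cons, hs, if_pos]
        have h1 : (done ++ [cur]) ++ [([] : List String)] = (done ++ [cur]) ++ [[]] := rfl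
        rw [show done ++ [cur] ++ [([] : List String)] = (done ++ [cur]) ++ [[]] from rfl,
          ih (done ++ [cur]) []]
        simp [pvH, hs, pvCount]
      · simp only [List.foldl_cons, hs, Bool.false_eq_true, if_neg, not_false_iff]
        rw [show (done ++ [cur]).dropLast ++ [(done ++ [cur]).getLastD [] ++ [t]]
              = done ++ [cur ++ [t]] by simp,
          ih done (cur ++ [t])]
        simp [pvH, hs, pvCount]

-- ===== VERDICT (by name: the statement is the Claim_ definition above) =====
theorem grouped_shape_counter_spec : Claim_equal_grouped_shape_counter := by
  intro L _
  unfold Spec_grouped_shape_counter grouped_shape_counter grouped_shape_counter_alt pvSegments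
  have hA := pvA_fold L pvShapes0 [] (by decide)
  have hB := pvB_fold L [] []
  simp only [List.nil_append, List.map_nil] at hA hB
  rw [hA, hB]
  rfl
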